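-- pv_equiv track=rewrite | github.com/Arsen1302/Code-copy-detector | TestData/solutions/problem_410_4.py | solution_410_4
-- ===== SOURCE A (Python) =====
-- def solution_410_4(n: int) -> bool:
--     if(n<2):
--         return True
--     n=bin(n)[2:]
--     for i in range(1,len(n)):
--         if(n[i]==n[i-1]):
--             return False
--     return True
-- ===== SOURCE B (Python) =====
-- def solution_410_4(n: int) -> bool:
--     if n < 2:
--         return True
--     x = n ^ (n >> 1)
--     return (x & (x + 1)) == 0
-- ===== Notes on version B (the rewrite author's own statement) =====
-- stated objective: alternative
-- what changed: Replaces the binary-string conversion and adjacent-character scan with the closed-form bit trick x = n ^ (n >> 1); alternating bits iff x & (x+1) == 0.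
import Mathlib
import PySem

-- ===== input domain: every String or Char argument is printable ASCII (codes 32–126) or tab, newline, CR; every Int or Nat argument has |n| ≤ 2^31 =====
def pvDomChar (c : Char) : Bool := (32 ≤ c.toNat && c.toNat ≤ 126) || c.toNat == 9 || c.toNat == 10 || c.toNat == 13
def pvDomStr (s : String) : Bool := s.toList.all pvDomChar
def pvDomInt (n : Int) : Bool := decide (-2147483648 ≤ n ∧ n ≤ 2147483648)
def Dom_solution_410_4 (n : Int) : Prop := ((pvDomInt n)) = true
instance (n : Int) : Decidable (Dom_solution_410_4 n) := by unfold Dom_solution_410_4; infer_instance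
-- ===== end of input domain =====

-- B replaces A's binary-string construction and adjacent-character scan by the closed-form
-- bit trick x = n ^ (n >> 1); alternating bits iff x & (x+1) == 0 (objective: alternative).

-- ===== PORT A =====
-- the for-loop "for i in range(1,len(n)): if n[i]==n[i-1]: return False", comparing each
-- character with its predecessor in order, with early exit
def pvScanA (prev : Char) : List Char → Bool
  | [] => true
  | c :: rest => if c == prev then false else pvScanA c rest

-- entry into the loop: first character (if any) becomes the first predecessor
def pvCheck : List Char → Bool
  | [] => true
  | c :: rest => pvScanA c rest

def solution_410_4 (n : Int) : Bool :=
  if n < 2 then true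
  else
    -- n = bin(n)[2:]
    pvCheck (PySem.List.slice (PySem.Int.pyBin n).toList (some 2) none)

-- ===== PORT B =====
def solution_410_4_alt (n : Int) : Bool :=
  if n < 2 then true
  else
    let x := PySem.Int.bxor n (n >>> (1 : Nat))
    PySem.Int.band x (x + 1) == 0

-- ===== PRECONDITION & SPEC =====
def Spec_solution_410_4 (n : Int) (out : Bool) : Prop := out = solution_410_4_alt n
instance (n : Int) (out : Bool) : Decidable (Spec_solution_410_4 n out) := by unfold Spec_solution_410_4; infer_instance

-- ===== CLAIM (what is proved, stated in full; the proofs are below) =====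
def Claim_equal_solution_410_4 : Prop := ∀ (n : Int), Dom_solution_410_4 n → Spec_solution_410_4 n (solution_410_4 n)

-- ===== LEMMAS AND PROOFS =====

-- binary digits of n, most significant first (what bin(n)[2:] produces for n ≥ 1)
def pvBinRep (n : Nat) : List Char :=
  if h : n / 2 = 0 then [Nat.digitChar (n % 2)]
  else pvBinRep (n / 2) ++ [Nat.digitChar (n % 2)]
  termination_by n
  decreasing_by omega

-- accumulator form, mirroring Nat.toDigitsCore
def pvBinAux (n : Nat) (l : List Char) : List Char :=
  if h : n / 2 = 0 then Nat.digitChar (n % 2) :: l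
  else pvBinAux (n / 2) (Nat.digitChar (n % 2) :: l)
  termination_by n
  decreasing_by omega

-- "has alternating bits", by halving
def pvAltN (m : Nat) : Bool :=
  if h : m < 2 then true
  else (decide (m % 2 ≠ m / 2 % 2)) && pvAltN (m / 2)
  termination_by m
  decreasing_by omega

theorem pvToDigitsCore_eq_binAux : ∀ (f n : Nat) (l : List Char), n < f →
    Nat.toDigitsCore 2 f n l = pvBinAux n l := by
  intro f
  induction f with
  | zero => intro n l h; omega
  | succ f ih =>
    intro n l h
    rw [Nat.toDigitsCore, pvBinAux]
    by_cases h2 : n / 2 = 0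
    · simp [h2]
    · simp only [h2, if_false]
      exact ih (n / 2) _ (by omega)

theorem pvBinAux_eq : ∀ (n : Nat) (l : List Char), pvBinAux n l = pvBinRep n ++ l := by
  intro n
  induction n using Nat.strong_induction_on with
  | _ n ih =>
    intro l
    rw [pvBinAux, pvBinRep]
    by_cases h2 : n / 2 = 0
    · simp [h2]
    · rw [dif_neg h2, dif_neg h2]
      rw [ih (n / 2) (by omega), List.append_assoc]
      rfl

theorem pvToDigits_eq (m : Nat) : Nat.toDigits 2 m = pvBinRep m := by
  rw [Nat.toDigits, pvToDigitsCore_eq_binAux (m + 1) m [] (by omega), pvBinAux_eq,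
    List.append_nil]

theorem pvBinRep_ne_nil (n : Nat) : pvBinRep n ≠ [] := by
  rw [pvBinRep]; by_cases h2 : n / 2 = 0 <;> simp [h2]

theorem pvBinRep_getLastD (n : Nat) (d : Char) :
    (pvBinRep n).getLastD d = Nat.digitChar (n % 2) := by
  rw [pvBinRep]; by_cases h2 : n / 2 = 0 <;> simp [h2]

theorem pvScan_concat : ∀ (l : List Char) (prev c : Char),
    pvScanA prev (l ++ [c]) = (pvScanA prev l && !(l.getLastD prev == c)) := by
  intro l
  induction l with
  | nil =>
    intro prev c
    simp only [List.nil_append, pvScanA, List.getLastD_nil, Bool.true_and]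
    by_cases h : c = prev
    · subst h; simp
    · simp only [beq_iff_eq]
      rw [if_neg h]
      have : ¬ prev = c := fun hh => h hh.symm
      simp [this]
  | cons d t ih =>
    intro prev c
    simp only [List.cons_append, pvScanA, List.getLastD_cons]
    by_cases h : d == prev
    · simp [h]
    · simp only [h]
      exact ih d c

theorem pvDigitChar_ne (a b : Nat) (ha : a < 2) (hb : b < 2) :
    (!(Nat.digitChar a == Nat.digitChar b)) = decide (b ≠ a) := by
  interval_cases a <;> interval_cases b <;> decide

theorem pvCheck_binRep : ∀ (m : Nat), 1 ≤ m → pvCheck (pvBinRep m) = pvAltN m := by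
  intro m
  induction m using Nat.strong_induction_on with
  | _ m ih =>
    intro hm
    by_cases h2 : m / 2 = 0
    · -- m = 1
      have h1 : m = 1 := by omega
      subst h1
      rw [pvBinRep, dif_pos (by norm_num), pvAltN, dif_pos (by norm_num)]
      rfl
    · rw [pvBinRep, dif_neg h2]
      obtain ⟨c₀, rest, hl⟩ : ∃ c₀ rest, pvBinRep (m / 2) = c₀ :: rest := by
        cases h : pvBinRep (m / 2) with
        | nil => exact absurd h (pvBinRep_ne_nil _)
        | cons a t => exact ⟨a, t, rfl⟩
      rw [hl]
      show pvScanA c₀ (rest ++ [Nat.digitChar (m % 2)]) = pvAltN m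
      rw [pvScan_concat]
      have hlast : rest.getLastD c₀ = Nat.digitChar (m / 2 % 2) := by
        have := pvBinRep_getLastD (m / 2) c₀
        rw [hl, List.getLastD_cons] at this
        exact this
      have hscan : pvScanA c₀ rest = pvAltN (m / 2) := by
        have := ih (m / 2) (by omega) (by omega)
        rw [hl] at this
        exact this
      rw [hlast, hscan, pvDigitChar_ne _ _ (Nat.mod_lt _ (by omega)) (Nat.mod_lt _ (by omega))]
      have hAm : pvAltN m = ((decide (m % 2 ≠ m / 2 % 2)) && pvAltN (m / 2)) := by
        rw [pvAltN, dif_neg (by omega : ¬ m < 2)]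
      rw [hAm, Bool.and_comm]

-- ---- B side: Nat bit lemmas ----

theorem pvXor_div_two (a b : Nat) : (a ^^^ b) / 2 = a / 2 ^^^ b / 2 := by
  apply Nat.eq_of_testBit_eq
  intro i
  simp [Nat.testBit_div_two, Nat.testBit_xor]

theorem pvAnd_div_two (a b : Nat) : (a &&& b) / 2 = a / 2 &&& b / 2 := by
  apply Nat.eq_of_testBit_eq
  intro i
  simp [Nat.testBit_div_two, Nat.testBit_and]

theorem pvAnd_mod_two (a b : Nat) : (a &&& b) % 2 = a % 2 * (b % 2) := by
  have h := Nat.testBit_and a b 0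
  simp only [Nat.testBit_zero] at h
  have h' := congrArg (fun x => x = true) h
  simp only [decide_eq_true_eq, Bool.and_eq_true] at h'
  have h3 := iff_of_eq h'
  rcases Nat.mod_two_eq_zero_or_one a with ha | ha <;>
    rcases Nat.mod_two_eq_zero_or_one b with hb | hb <;>
      rw [ha, hb] <;> rw [ha, hb] at h3 <;> omega

theorem pvAltB_eq_altN : ∀ (m : Nat),
    decide ((m ^^^ m / 2) &&& ((m ^^^ m / 2) + 1) = 0) = pvAltN m := by
  intro m
  induction m using Nat.strong_induction_on with
  | _ m ih =>
    by_cases hm : m < 2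
    · interval_cases m <;> rw [pvAltN, dif_pos (by norm_num)] <;> simp
    · set x := m ^^^ m / 2 with hx
      have hxm : x % 2 = (m + m / 2) % 2 := Nat.xor_mod_two_eq
      have hxd : x / 2 = m / 2 ^^^ m / 2 / 2 := pvXor_div_two m (m / 2)
      have hdm : (x &&& (x + 1)) % 2 = x % 2 * ((x + 1) % 2) := pvAnd_mod_two x (x + 1)
      have hdd : (x &&& (x + 1)) / 2 = x / 2 &&& (x + 1) / 2 := pvAnd_div_two x (x + 1)
      have hsplit := Nat.div_add_mod (x &&& (x + 1)) 2
      rw [pvAltN, dif_neg hm]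
      by_cases hodd : x % 2 = 1
      · -- bit 0 and bit 1 of m differ
        have hne : (decide (m % 2 ≠ m / 2 % 2)) = true := by
          simp only [decide_eq_true_eq]; omega
        rw [hne, Bool.true_and]
        have h1 : (x + 1) / 2 = x / 2 + 1 := by omega
        have e1 : (x &&& (x + 1)) % 2 = 0 := by
          rw [hdm, hodd, Nat.one_mul]; omega
        have e2 : (x &&& (x + 1)) / 2 = x / 2 &&& (x / 2 + 1) := by rw [hdd, h1]
        have key : (x &&& (x + 1)) = 2 * (x / 2 &&& (x / 2 + 1)) := by omega
        have hih := ih (m / 2) (by omega)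
        rw [← hxd] at hih
        rw [← hih]
        simp only [decide_eq_decide]
        omega
      · -- bits agree: A's scan fails; x is even and positive, so x & (x+1) = x ≠ 0
        have hne : (decide (m % 2 ≠ m / 2 % 2)) = false := by
          simp only [decide_eq_false_iff_not, Ne, not_not]; omega
        rw [hne, Bool.false_and]
        have hx0 : x ≠ 0 := by
          intro h0
          have : m = m / 2 := Nat.eq_of_xor_eq_zero (hx ▸ h0)
          omega
        have h1 : (x + 1) / 2 = x / 2 := by omega
        have e2 : (x &&& (x + 1)) / 2 = x / 2 := by rw [hdd, h1, Nat.and_self]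
        simp only [decide_eq_false_iff_not]
        omega

-- ===== VERDICT (by name: the statement is the Claim_ definition above) =====
theorem solution_410_4_spec : Claim_equal_solution_410_4 := by
  intro n _
  unfold Spec_solution_410_4 solution_410_4 solution_410_4_alt
  by_cases h : n < 2
  · simp [h]
  · rw [if_neg h, if_neg h]
    have hn0 : (0 : Int) ≤ n := by omega
    have hn : n = ((n.toNat : Nat) : Int) := (Int.toNat_of_nonneg hn0).symm
    set m : Nat := n.toNat with hmdef
    have hm1 : 1 ≤ m := by omega
    -- A side
    have hA : PySem.List.slice (PySem.Int.pyBin n).toList (some 2) none = pvBinRep m := by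
      rw [PySem.Int.toList_pyBin, PySem.Int.toBinChars0b, if_neg (by omega : ¬ n < 0),
        PySem.List.slice_from _ (by norm_num : (0:Int) ≤ 2)]
      show List.drop 2 ('0' :: 'b' :: Nat.toDigits 2 m) = pvBinRep m
      rw [List.drop_succ_cons, List.drop_succ_cons, List.drop_zero, pvToDigits_eq]
    rw [hA, pvCheck_binRep m hm1]
    -- B side
    have hBx : PySem.Int.bxor n (n >>> (1 : Nat)) = ((m ^^^ m / 2 : Nat) : Int) := by
      rw [hn, ← Int.natCast_shiftRight m 1, PySem.Int.bxor_natCast, Nat.shiftRight_one]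
    have hBa : PySem.Int.band ((m ^^^ m / 2 : Nat) : Int) (((m ^^^ m / 2 : Nat) : Int) + 1)
        = (((m ^^^ m / 2) &&& ((m ^^^ m / 2) + 1) : Nat) : Int) := by
      rw [(by push_cast; ring : (((m ^^^ m / 2 : Nat) : Int) + 1) = (((m ^^^ m / 2) + 1 : Nat) : Int)),
        PySem.Int.band_natCast]
    show pvAltN m = (PySem.Int.band (PySem.Int.bxor n (n >>> (1 : Nat)))
      (PySem.Int.bxor n (n >>> (1 : Nat)) + 1) == 0)
    rw [hBx, hBa, ← pvAltB_eq_altN m]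
    rw [Bool.eq_iff_iff]
    simp
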